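-- pv_equiv track=rewrite | github.com/yutautan-sketch/EchoTest_by_TransVOD | edifi_tools/make_format_dir.py | get_continuous_sequences
-- ===== SOURCE A (Python) =====
-- def get_continuous_sequences(frame_numbers):
--     """ソート済みのフレーム番号リストから連続した区間を抽出する"""
--     if not frame_numbers:
--         return []
--     sequences = []
--     start_seq = frame_numbers[0]
--     end_seq = frame_numbers[0]
--     for i in range(1, len(frame_numbers)):
--         if frame_numbers[i] == end_seq + 1:
--             end_seq = frame_numbers[i]
--         else:
--             sequences.append((start_seq, end_seq))
--             start_seq = end_seq = frame_numbers[i]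
--     sequences.append((start_seq, end_seq))
--     return sequences
-- ===== SOURCE B (Python) =====
-- def get_continuous_sequences(frame_numbers):
--     """ソート済みのフレーム番号リストから連続した区間を抽出する"""
--     if not frame_numbers:
--         return []
--     pairs = list(zip(frame_numbers, frame_numbers[1:]))
--     starts = [frame_numbers[0]] + [b for a, b in pairs if b != a + 1]
--     ends = [a for a, b in pairs if b != a + 1] + [frame_numbers[-1]]
--     return list(zip(starts, ends))
-- ===== Notes on version B (the rewrite author's own statement) =====
-- stated objective: alternative
-- what changed: Replaces the stateful accumulator loop (start/end registers mutated per index) by boundary detection on adjacent pairs: zip the list with its own tail, filter the break pairs, and zip run-starts with run-ends.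
import Mathlib
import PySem

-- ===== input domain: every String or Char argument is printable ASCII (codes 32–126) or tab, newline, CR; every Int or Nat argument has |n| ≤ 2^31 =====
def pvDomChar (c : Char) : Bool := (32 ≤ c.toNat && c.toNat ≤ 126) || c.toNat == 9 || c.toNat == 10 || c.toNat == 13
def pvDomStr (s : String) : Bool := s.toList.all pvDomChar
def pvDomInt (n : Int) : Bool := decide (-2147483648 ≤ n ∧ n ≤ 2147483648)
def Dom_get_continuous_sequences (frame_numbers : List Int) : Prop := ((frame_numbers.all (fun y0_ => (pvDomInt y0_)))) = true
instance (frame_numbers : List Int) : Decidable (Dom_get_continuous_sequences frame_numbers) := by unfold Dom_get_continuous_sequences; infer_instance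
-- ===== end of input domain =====

-- B replaces A's stateful start/end accumulator loop by boundary detection on adjacent
-- pairs (zip with the tail, filter breaks, zip run-starts with run-ends); alternative, same cost.

-- ===== PORT A =====
def get_continuous_sequences (frame_numbers : List Int) : List (Int × Int) :=
  if frame_numbers = [] then []
  else
    let s0 := PySem.List.pyGetD frame_numbers 0 0
    let r := (PySem.List.pyRange 1 (frame_numbers.length : Int) 1).foldl
      (fun (acc : List (Int × Int) × Int × Int) i =>
        let x := PySem.List.pyGetD frame_numbers i 0
        if x = acc.2.2 + 1 then (acc.1, acc.2.1, x)
        else (acc.1 ++ [(acc.2.1, acc.2.2)], x, x))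
      ([], s0, s0)
    r.1 ++ [(r.2.1, r.2.2)]

-- ===== PORT B =====
def get_continuous_sequences_alt (frame_numbers : List Int) : List (Int × Int) :=
  if frame_numbers = [] then []
  else
    let pairs := frame_numbers.zip (PySem.List.slice frame_numbers (some 1) none)
    let brks := pairs.filter (fun p => p.2 ≠ p.1 + 1)
    let starts := PySem.List.pyGetD frame_numbers 0 0 :: brks.map Prod.snd
    let ends := brks.map Prod.fst ++ [PySem.List.pyGetD frame_numbers (-1) 0]
    starts.zip ends

-- ===== PRECONDITION & SPEC =====
def Spec_get_continuous_sequences (frame_numbers : List Int) (out : List (Int × Int)) : Prop := out = get_continuous_sequences_alt frame_numbers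
instance (frame_numbers : List Int) (out : List (Int × Int)) : Decidable (Spec_get_continuous_sequences frame_numbers out) := by unfold Spec_get_continuous_sequences; infer_instance

-- ===== CLAIM (what is proved, stated in full; the proofs are below) =====
def Claim_equal_get_continuous_sequences : Prop := ∀ (frame_numbers : List Int), Dom_get_continuous_sequences frame_numbers → Spec_get_continuous_sequences frame_numbers (get_continuous_sequences frame_numbers)

-- ===== LEMMAS AND PROOFS =====

/-- Canonical run extraction: `s` is the start and `e` the last element seen. -/
def pvRuns (s e : Int) : List Int → List (Int × Int)
  | [] => [(s, e)]
  | x :: xs => if x = e + 1 then pvRuns s x xs else (s, e) :: pvRuns x x xs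

/-- A's loop body as a fold over the elements. -/
def pvStep (acc : List (Int × Int) × Int × Int) (x : Int) : List (Int × Int) × Int × Int :=
  if x = acc.2.2 + 1 then (acc.1, acc.2.1, x)
  else (acc.1 ++ [(acc.2.1, acc.2.2)], x, x)

lemma pvFoldA (t : List Int) : ∀ (acc : List (Int × Int)) (s e : Int),
    (t.foldl pvStep (acc, s, e)).1 ++
      [((t.foldl pvStep (acc, s, e)).2.1, (t.foldl pvStep (acc, s, e)).2.2)]
      = acc ++ pvRuns s e t := by
  induction t with
  | nil => intro acc s e; simp [pvRuns]
  | cons x xs ih =>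
    intro acc s e
    by_cases hx : x = e + 1 <;>
      simp [pvStep, pvRuns, hx, ih]

lemma pvZipB (t : List Int) : ∀ (h s : Int),
    ((s :: (((h :: t).zip t).filter (fun p => p.2 ≠ p.1 + 1)).map Prod.snd).zip
      ((((h :: t).zip t).filter (fun p => p.2 ≠ p.1 + 1)).map Prod.fst ++
        [(h :: t).getLast (by simp)]))
      = pvRuns s h t := by
  induction t with
  | nil => intro h s; simp [pvRuns]
  | cons x xs ih =>
    intro h s
    have hlast : (h :: x :: xs).getLast (by simp) = (x :: xs).getLast (by simp) := by
      simp [List.getLast]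
    by_cases hx : x = h + 1
    · simpa [pvRuns, hx, hlast] using ih x s
    · simpa [pvRuns, hx, hlast] using ih x x

-- ===== VERDICT (by name: the statement is the Claim_ definition above) =====
theorem get_continuous_sequences_spec : Claim_equal_get_continuous_sequences := by
  intro fn _
  unfold Spec_get_continuous_sequences get_continuous_sequences get_continuous_sequences_alt
  cases fn with
  | nil => simp
  | cons h t =>
    simp only [if_neg (List.cons_ne_nil h t)]
    have hfold :
        (PySem.List.pyRange 1 ((h :: t).length : Int) 1).foldl
          (fun (acc : List (Int × Int) × Int × Int) i =>
            pvStep acc (PySem.List.pyGetD (h :: t) i 0)) ([], h, h)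
          = t.foldl pvStep ([], h, h) := by
      simpa using PySem.List.foldl_pyRange_pyGetD' (h :: t) 0 pvStep ([], h, h) (a := 1) (by omega)
    have hA := pvFoldA t [] h h
    rw [show (PySem.List.pyGetD (h :: t) 0 0) = h from PySem.List.pyGetD_zero_cons h t 0]
    simp only [pvStep] at hfold
    rw [hfold, hA]
    rw [PySem.List.slice_from_one, PySem.List.pyGetD_neg_one (h :: t) 0 (by simp)]
    simpa using (pvZipB t h h).symm
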